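-- pv_equiv track=rewrite | github.com/dgoldman0/graphnumbers | reboot/canonstar.py | disjoint_union_bitrows
-- ===== SOURCE A (Python) =====
-- from typing import Dict, Iterable, List, Optional, Sequence, Tuple
--
-- def disjoint_union_bitrows(components: Sequence[Sequence[int]]) -> List[int]:
--     """Block-diagonal disjoint union of bitrow components."""
--     total = sum(len(c) for c in components)
--     if total == 0:
--         return []
--     out = [0] * total
--     off = 0
--     for comp in components:
--         k = len(comp)
--         for i in range(k):
--             row = comp[i]
--             shifted = 0
--             x = row
--             while x:
--                 lsb = x & -x
--                 j = lsb.bit_length() - 1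
--                 x -= lsb
--                 shifted |= (1 << (off + j))
--             out[off + i] = shifted
--         off += k
--     for i in range(total):
--         out[i] &= ~(1 << i)
--     return out
-- ===== SOURCE B (Python) =====
-- from typing import List, Sequence
--
-- def disjoint_union_bitrows(components: Sequence[Sequence[int]]) -> List[int]:
--     """Block-diagonal disjoint union of bitrow components."""
--     out: List[int] = []
--     off = 0
--     for comp in components:
--         out += [(row << off) & ~(1 << (off + i)) for i, row in enumerate(comp)]
--         off += len(comp)
--     return out
-- ===== Notes on version B (the rewrite author's own statement) =====
-- stated objective: simpler
-- what changed: B replaces A's per-set-bit reconstruction loop (extracting each set bit with x & -x and re-placing it at off+j) by a single whole-row shift row << off with the diagonal bit cleared inline, and appends rows instead of preallocating and index-assigning; intended as faster (a timing run saw A time out where B returned, but could not verify a ratio), claimed only as simpler.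
import Mathlib
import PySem

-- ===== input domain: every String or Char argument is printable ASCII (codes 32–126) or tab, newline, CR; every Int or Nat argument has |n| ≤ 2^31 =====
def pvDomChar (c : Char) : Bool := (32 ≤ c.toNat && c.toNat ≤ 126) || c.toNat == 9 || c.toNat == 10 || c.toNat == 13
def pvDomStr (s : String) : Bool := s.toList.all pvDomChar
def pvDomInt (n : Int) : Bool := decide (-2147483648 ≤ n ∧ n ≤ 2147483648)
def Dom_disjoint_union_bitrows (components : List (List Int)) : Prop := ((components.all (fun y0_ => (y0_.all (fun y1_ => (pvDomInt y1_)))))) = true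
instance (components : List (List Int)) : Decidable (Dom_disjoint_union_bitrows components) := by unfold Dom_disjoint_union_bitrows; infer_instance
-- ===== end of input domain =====

-- B replaces A's per-set-bit reconstruction loop by a single whole-row shift with the
-- diagonal bit cleared inline, appending rows instead of preallocating and index-assigning.

-- ===== PORT A =====
-- A's inner `while x:` loop.  The Nat fuel only makes the recursion total: for the
-- 0 ≤ x admitted by Pre_ it is called with fuel = x.toNat, which the proof shows is
-- always enough (Python's loop never terminates for x < 0; Pre_ excludes those rows).
def pvBitLoop : Nat → Int → Int → Nat → Int
  | 0, _, shifted, _ => shifted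
  | fuel + 1, x, shifted, off =>
    if x = 0 then shifted
    else
      let lsb := PySem.Int.band x (-x)          -- lsb = x & -x
      let j := PySem.Int.bitLength lsb - 1      -- j = lsb.bit_length() - 1
      pvBitLoop fuel (x - lsb) (PySem.Int.bor shifted ((1 : Int) <<< (off + j))) off

-- one step of A's inner `for i in range(k)` loop: out[off+i] = shifted
def pvRowWrite (off : Nat) (comp : List Int) (out : List Int) (i : Nat) : List Int :=
  let row := comp.getD i 0                      -- row = comp[i]  (i < len(comp) always)
  out.set (off + i) (pvBitLoop row.toNat row 0 off)

-- one step of A's `for comp in components` loop (carries (out, off))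
def pvCompStep (acc : List Int × Nat) (comp : List Int) : List Int × Nat :=
  ((List.range comp.length).foldl (pvRowWrite acc.2 comp) acc.1, acc.2 + comp.length)

-- one step of A's final loop: out[i] &= ~(1 << i)
def pvClearStep (out : List Int) (i : Nat) : List Int :=
  out.set i (PySem.Int.band (out.getD i 0) (Int.not ((1 : Int) <<< i)))

def disjoint_union_bitrows (components : List (List Int)) : List Int :=
  let total := (components.map List.length).sum         -- total = sum(len(c) for c in components)
  if total = 0 then []
  else
    (List.range total).foldl pvClearStep
      (components.foldl pvCompStep (List.replicate total (0 : Int), 0)).1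

-- ===== PORT B =====
-- one step of B's loop: append the comprehension over enumerate(comp), advance off
def pvAppendStep (acc : List Int × Nat) (comp : List Int) : List Int × Nat :=
  (acc.1 ++ comp.mapIdx
     (fun i (row : Int) => PySem.Int.band (row <<< acc.2) (Int.not ((1 : Int) <<< (acc.2 + i)))),
   acc.2 + comp.length)

def disjoint_union_bitrows_alt (components : List (List Int)) : List Int :=
  (components.foldl pvAppendStep ([], 0)).1

-- ===== PRECONDITION & SPEC =====
-- Pre_ excludes negative rows: on any component containing a negative entry Python A's
-- inner `while x:` loop never terminates (x -= x & -x keeps x negative), so A returns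
-- nothing there.
def Pre_disjoint_union_bitrows (components : List (List Int)) : Prop :=
  ∀ c ∈ components, ∀ r ∈ c, 0 ≤ r
instance (components : List (List Int)) : Decidable (Pre_disjoint_union_bitrows components) := by
  unfold Pre_disjoint_union_bitrows; infer_instance

def pvWitness_disjoint_union_bitrows : List (List Int) := [[1, 2], [3]]

def Spec_disjoint_union_bitrows (components : List (List Int)) (out : List Int) : Prop := out = disjoint_union_bitrows_alt components
instance (components : List (List Int)) (out : List Int) : Decidable (Spec_disjoint_union_bitrows components out) := by unfold Spec_disjoint_union_bitrows; infer_instance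

-- ===== CLAIM (what is proved, stated in full; the proofs are below) =====
def Claim_equal_disjoint_union_bitrows : Prop := ∀ (components : List (List Int)), Dom_disjoint_union_bitrows components → Pre_disjoint_union_bitrows components → Spec_disjoint_union_bitrows components (disjoint_union_bitrows components)

-- ===== LEMMAS AND PROOFS =====

-- the value A's inner while-loop stores for one row
def pvRowVal (off : Nat) (row : Int) : Int := pvBitLoop row.toNat row 0 off

-- what A's main loop leaves in `out` (before the diagonal-clearing pass)
def pvSpecRaw (off : Nat) : List (List Int) → List Int
  | [] => []
  | c :: cs => c.map (pvRowVal off) ++ pvSpecRaw (off + c.length) cs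

-- the block-diagonal shape both ports are reduced to (B's blocks)
def pvSpec (off : Nat) : List (List Int) → List Int
  | [] => []
  | c :: cs =>
      c.mapIdx (fun i (row : Int) => PySem.Int.band (row <<< off) (Int.not ((1 : Int) <<< (off + i))))
        ++ pvSpec (off + c.length) cs

-- ---- bit-level facts ----

theorem pvHighBit (j m i : Nat) (hij : i < j + 1) : (2 ^ (j+1) * m).testBit i = false := by
  rw [show 2 ^ (j+1) * m = 2 ^ (j+1) * m + 0 by omega,
      Nat.testBit_two_pow_mul_add _ (by positivity : (0:Nat) < 2 ^ (j+1))]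
  simp [hij]

-- n & (n-1) clears the lowest set bit
theorem pvLand_strip (j m : Nat) :
    (2 ^ (j + 1) * m + 2 ^ j) &&& (2 ^ (j + 1) * m + 2 ^ j - 1) = 2 ^ (j + 1) * m := by
  have h1 : (1:Nat) ≤ 2 ^ j := Nat.one_le_two_pow
  have hlt : 2 ^ j < 2 ^ (j + 1) := Nat.pow_lt_pow_right (by omega) (by omega)
  rw [show 2 ^ (j + 1) * m + 2 ^ j - 1 = 2 ^ (j + 1) * m + (2 ^ j - 1) by omega]
  apply Nat.eq_of_testBit_eq
  intro i
  rw [Nat.testBit_and, Nat.testBit_two_pow_mul_add _ hlt,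
      Nat.testBit_two_pow_mul_add _ (by omega : 2 ^ j - 1 < 2 ^ (j+1))]
  by_cases hij : i < j + 1
  · simp only [if_pos hij, Nat.testBit_two_pow, Nat.testBit_two_pow_sub_one, pvHighBit j m i hij,
      Bool.and_eq_false_iff, decide_eq_false_iff_not]
    omega
  · simp only [if_neg hij, Bool.and_self]
    conv_rhs => rw [show 2 ^ (j+1) * m = 2 ^ (j+1) * m + 0 by omega]
    rw [Nat.testBit_two_pow_mul_add _ (by positivity : (0:Nat) < 2 ^ (j+1))]
    simp [hij]

-- or-ing the stripped lowest bit back in restores n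
theorem pvLor_lsb (j m : Nat) :
    2 ^ j ||| 2 ^ (j + 1) * m = 2 ^ (j + 1) * m + 2 ^ j := by
  have hlt : 2 ^ j < 2 ^ (j + 1) := Nat.pow_lt_pow_right (by omega) (by omega)
  apply Nat.eq_of_testBit_eq
  intro i
  rw [Nat.testBit_or, Nat.testBit_two_pow_mul_add _ hlt]
  by_cases hij : i < j + 1
  · simp [hij, pvHighBit j m i hij]
  · rw [show 2 ^ (j+1) * m = 2 ^ (j+1) * m + 0 from by omega,
        Nat.testBit_two_pow_mul_add _ (by positivity : (0:Nat) < 2 ^ (j+1))]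
    simp [hij, show j ≠ i by omega]

-- x & -x on a positive x, through PySem's band on a negative second argument
theorem pvBand_neg_self (n : Nat) (h : 0 < n) :
    PySem.Int.band (n : Int) (-(n : Int)) = ((n - (n &&& (n - 1)) : Nat) : Int) := by
  have h1 : (- -(n:Int) - 1).toNat = n - 1 := by omega
  simp only [PySem.Int.band, if_pos (by positivity : (0:Int) ≤ (n:Int)),
    if_neg (by omega : ¬ (0:Int) ≤ -(n:Int)), h1, Int.toNat_natCast]

theorem pvBitLength_two_pow (k : Nat) : PySem.Int.bitLength ((2 ^ k : Nat) : Int) = k + 1 := by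
  have hne : ((2 ^ k : Nat) : Int) ≠ 0 := by positivity
  have hle := PySem.Int.two_pow_bitLength_le ((2 ^ k : Nat) : Int) hne
  have hlt := PySem.Int.lt_two_pow_bitLength ((2 ^ k : Nat) : Int)
  rw [Int.natAbs_natCast] at hle hlt
  have l1 : PySem.Int.bitLength ((2 ^ k : Nat) : Int) - 1 ≤ k :=
    (Nat.pow_le_pow_iff_right (by omega)).mp hle
  have l2 : k < PySem.Int.bitLength ((2 ^ k : Nat) : Int) :=
    (Nat.pow_lt_pow_iff_right (by omega)).mp hlt
  omega

-- A's while-loop ORs in exactly the bits of n shifted by off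
theorem pvBitLoop_eq (fuel : Nat) : ∀ (n s off : Nat), n ≤ fuel →
    pvBitLoop fuel (n : Int) (s : Int) off = ((s ||| (n <<< off) : Nat) : Int) := by
  induction fuel with
  | zero =>
    intro n s off h
    have : n = 0 := by omega
    subst this
    simp [pvBitLoop]
  | succ f ih =>
    intro n s off h
    by_cases hn : n = 0
    · subst hn; simp [pvBitLoop]
    · obtain ⟨k, m', hodd, hnk⟩ := Nat.exists_eq_two_pow_mul_odd hn
      obtain ⟨m, hm⟩ := hodd
      have hn' : n = 2 ^ (k + 1) * m + 2 ^ k := by subst hnk hm; ring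
      have h2k : (1:Nat) ≤ 2 ^ k := Nat.one_le_two_pow
      have hband : PySem.Int.band (n : Int) (-(n : Int)) = ((2 ^ k : Nat) : Int) := by
        rw [pvBand_neg_self n (by omega)]
        congr 1
        rw [hn', pvLand_strip]
        omega
      simp only [pvBitLoop, if_neg (by exact_mod_cast hn : ¬ ((n:Int) = 0)), hband,
        pvBitLength_two_pow, Nat.add_sub_cancel]
      have hx' : (n : Int) - ((2 ^ k : Nat) : Int) = ((2 ^ (k+1) * m : Nat) : Int) := by
        push_cast [hn']; ring
      have hs' : PySem.Int.bor (s : Int) ((1 : Int) <<< (off + k))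
          = ((s ||| 2 ^ (off + k) : Nat) : Int) := by
        rw [show ((1:Int)) = ((1:Nat) : Int) from rfl, ← Int.natCast_shiftLeft,
          PySem.Int.bor_natCast, Nat.one_shiftLeft]
      rw [hx', hs', ih _ _ off (by omega : 2 ^ (k+1) * m ≤ f)]
      congr 1
      rw [Nat.lor_assoc]
      congr 1
      rw [Nat.shiftLeft_eq, Nat.shiftLeft_eq, hn',
        show (2 ^ (k + 1) * m + 2 ^ k) * 2 ^ off = 2 ^ (off + k + 1) * m + 2 ^ (off + k) from by ring,
        show 2 ^ (k + 1) * m * 2 ^ off = 2 ^ (off + k + 1) * m from by ring]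
      exact pvLor_lsb (off + k) m

-- for a nonnegative row A's per-bit loop is B's single shift
theorem pvBitLoop_shift (row : Int) (off : Nat) (h : 0 ≤ row) :
    pvRowVal off row = row <<< off := by
  unfold pvRowVal
  obtain ⟨n, rfl⟩ : ∃ nn : Nat, row = (nn : Int) := ⟨row.toNat, by omega⟩
  simp only [Int.toNat_natCast]
  rw [show ((0:Int)) = ((0:Nat) : Int) from rfl, pvBitLoop_eq n n 0 off le_rfl,
    Nat.zero_or, ← Int.natCast_shiftLeft]

-- ---- list plumbing ----

theorem pvSet_append (l l' : List Int) (i : Nat) (v : Int) :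
    (l ++ l').set (l.length + i) v = l ++ l'.set i v := by
  rw [List.set_append_right _ _ (by omega), Nat.add_sub_cancel_left]

theorem pvMapIdx_congr {α β : Type} (l : List α) (f g : Nat → α → β)
    (h : ∀ i a, a ∈ l → f i a = g i a) : l.mapIdx f = l.mapIdx g := by
  induction l generalizing f g with
  | nil => rfl
  | cons a l ih =>
    rw [List.mapIdx_cons, List.mapIdx_cons, h 0 a List.mem_cons_self,
      ih (fun i => f (i+1)) (fun i => g (i+1)) (fun i b hb => h (i+1) b (List.mem_cons_of_mem a hb))]

theorem pvMapIdx_map {α β γ : Type} (V : α → β) :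
    ∀ (l : List α) (g : Nat → β → γ), (l.map V).mapIdx g = l.mapIdx (fun i a => g i (V a)) := by
  intro l
  induction l with
  | nil => intro g; rfl
  | cons a l ih => intro g; rw [List.map_cons, List.mapIdx_cons, List.mapIdx_cons, ih]

-- A's inner row loop fills the next comp.length slots with pvRowVal
theorem pvInnerA (done rest : List Int) (comp : List Int) (h : comp.length ≤ rest.length) :
    (List.range comp.length).foldl (pvRowWrite done.length comp) (done ++ rest)
      = done ++ comp.map (pvRowVal done.length) ++ rest.drop comp.length := by
  induction comp using List.reverseRecOn with
  | nil => simp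
  | append_singleton xs x ih =>
    rw [List.length_append, List.length_singleton, List.range_succ, List.foldl_append]
    have hx : xs.length < rest.length := by
      rw [List.length_append, List.length_singleton] at h; omega
    have hcongr : (List.range xs.length).foldl (pvRowWrite done.length (xs ++ [x])) (done ++ rest)
        = (List.range xs.length).foldl (pvRowWrite done.length xs) (done ++ rest) := by
      apply PySem.List.foldl_congr_mem
      intro acc i hi
      rw [List.mem_range] at hi
      unfold pvRowWrite
      rw [List.getD_append _ _ _ _ hi]
    rw [hcongr, ih (by omega), List.foldl_cons, List.foldl_nil]
    simp only [pvRowWrite, List.getD_append_right _ _ _ _ le_rfl, Nat.sub_self,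
      List.getD_cons_zero, List.drop_eq_getElem_cons hx]
    rw [show done.length + xs.length = (done ++ xs.map (pvRowVal done.length)).length + 0 from by
        simp, pvSet_append, List.set_cons_zero, List.map_append, List.map_singleton]
    simp only [List.append_assoc, List.cons_append, List.nil_append]
    rfl

-- A's main loop produces the raw (uncleared) block-diagonal list
theorem pvOuterA (cs : List (List Int)) :
    ∀ (done rest : List Int), (cs.map List.length).sum ≤ rest.length →
    (cs.foldl pvCompStep (done ++ rest, done.length)).1
      = done ++ pvSpecRaw done.length cs ++ rest.drop ((cs.map List.length).sum) := by
  induction cs with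
  | nil => intro done rest _; simp [pvSpecRaw]
  | cons c cs ih =>
    intro done rest h
    rw [List.map_cons, List.sum_cons] at h
    rw [List.foldl_cons]
    have hstep : pvCompStep (done ++ rest, done.length) c
        = ((done ++ c.map (pvRowVal done.length)) ++ rest.drop c.length,
           (done ++ c.map (pvRowVal done.length)).length) := by
      unfold pvCompStep
      rw [pvInnerA done rest c (by omega), List.append_assoc]
      congr 1
      simp
    rw [hstep, ih _ _ (by rw [List.length_drop]; omega)]
    simp only [pvSpecRaw, List.append_assoc, List.drop_drop, List.length_append, List.length_map,
      List.map_cons, List.sum_cons]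

-- the final pass clears bit i of entry i, entry by entry
theorem pvClearPrefix (l : List Int) :
    ∀ (n : Nat), n ≤ l.length →
    (List.range n).foldl pvClearStep l
      = (l.take n).mapIdx (fun i v => PySem.Int.band v (Int.not ((1 : Int) <<< i))) ++ l.drop n := by
  intro n
  induction n with
  | zero => intro _; simp
  | succ n ih =>
    intro h
    have hn : n < l.length := by omega
    rw [List.range_succ, List.foldl_append, ih (by omega), List.foldl_cons, List.foldl_nil]
    unfold pvClearStep
    have hlen : ((l.take n).mapIdx
        (fun i v => PySem.Int.band v (Int.not ((1 : Int) <<< i)))).length = n := by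
      simp [List.length_take, Nat.min_eq_left (le_of_lt hn)]
    rw [List.getD_append_right _ _ _ _ (by omega), hlen, Nat.sub_self,
      List.drop_eq_getElem_cons hn, List.getD_cons_zero,
      List.set_append_right _ _ (by omega), hlen, Nat.sub_self, List.set_cons_zero]
    rw [List.take_add_one, List.getElem?_eq_getElem hn]
    simp only [Option.toList_some, List.mapIdx_append, List.length_take,
      Nat.min_eq_left (le_of_lt hn)]
    simp

theorem pvSpecRaw_length (cs : List (List Int)) :
    ∀ off, (pvSpecRaw off cs).length = (cs.map List.length).sum := by
  induction cs with
  | nil => intro off; rfl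
  | cons c cs ih => intro off; simp [pvSpecRaw, ih]

-- clearing the diagonal of the raw list yields B's blocks (rows nonneg)
theorem pvClearSpec (cs : List (List Int)) :
    ∀ (off : Nat), (∀ c ∈ cs, ∀ r ∈ c, 0 ≤ r) →
    (pvSpecRaw off cs).mapIdx (fun i v => PySem.Int.band v (Int.not ((1 : Int) <<< (off + i))))
      = pvSpec off cs := by
  induction cs with
  | nil => intro off _; rfl
  | cons c cs ih =>
    intro off hpre
    simp only [pvSpecRaw, pvSpec, List.mapIdx_append, List.length_map]
    congr 1
    · rw [pvMapIdx_map]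
      apply pvMapIdx_congr
      intro i a ha
      rw [pvBitLoop_shift a off (hpre c List.mem_cons_self a ha)]
    · rw [pvMapIdx_congr _ _
        (fun i v => PySem.Int.band v (Int.not ((1 : Int) <<< ((off + c.length) + i))))
        (by intro i a _; simp only []; rw [show off + (i + c.length) = (off + c.length) + i from by omega])]
      exact ih (off + c.length) (fun d hd => hpre d (List.mem_cons_of_mem c hd))

-- B's fold appends exactly the blocks of pvSpec
theorem pvAltFold (cs : List (List Int)) :
    ∀ (out : List Int) (off : Nat), (cs.foldl pvAppendStep (out, off)).1 = out ++ pvSpec off cs := by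
  induction cs with
  | nil => intro out off; simp [pvSpec]
  | cons c cs ih =>
    intro out off
    rw [List.foldl_cons,
      show pvAppendStep (out, off) c
        = (out ++ c.mapIdx (fun i (row : Int) =>
            PySem.Int.band (row <<< off) (Int.not ((1 : Int) <<< (off + i)))), off + c.length)
        from rfl, ih]
    simp only [pvSpec, List.append_assoc]

theorem pvSpec_nil (cs : List (List Int)) :
    ∀ off, (cs.map List.length).sum = 0 → pvSpec off cs = [] := by
  induction cs with
  | nil => intro off _; rfl
  | cons c cs ih =>
    intro off h
    rw [List.map_cons, List.sum_cons] at h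
    have hc : c = [] := List.eq_nil_of_length_eq_zero (by omega)
    subst hc
    simp [pvSpec, ih _ (by omega)]

-- ===== VERDICT (by name: the statement is the Claim_ definition above) =====
theorem disjoint_union_bitrows_spec : Claim_equal_disjoint_union_bitrows := by
  intro components _ hpre
  unfold Spec_disjoint_union_bitrows disjoint_union_bitrows disjoint_union_bitrows_alt
  rw [pvAltFold components [] 0, List.nil_append]
  by_cases h : (components.map List.length).sum = 0
  · rw [if_pos h, pvSpec_nil components 0 h]
  · rw [if_neg h]
    have houter := pvOuterA components [] (List.replicate ((components.map List.length).sum) (0:Int))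
      (by rw [List.length_replicate])
    rw [List.nil_append, List.length_nil] at houter
    rw [houter, List.nil_append, List.drop_of_length_le (by rw [List.length_replicate]),
      List.append_nil]
    rw [show (components.map List.length).sum = (pvSpecRaw 0 components).length from
      (pvSpecRaw_length components 0).symm, pvClearPrefix _ _ le_rfl, List.take_length,
      List.drop_length, List.append_nil]
    rw [pvMapIdx_congr _ _
      (fun i v => PySem.Int.band v (Int.not ((1 : Int) <<< (0 + i))))
      (by intro i a _; simp only [Nat.zero_add])]
    exact pvClearSpec components 0 hpre
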